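-- pv_equiv track=rewrite | github.com/yujinii59/AlgorithmPractice | 프로그래머스/lv0/120956. 옹알이 （1）/옹알이 （1）.py | solution
-- ===== SOURCE A (Python) =====
-- def solution(babbling):
--     answer = 0
--     pron = ["aya", "ye", "woo", "ma"]
--     while babbling:
--         tmp = []
--         for word in babbling:
--             if len(word) > 2 and word[:3] in ["aya","woo"]:
--                 if len(word) == 3:
--                     answer += 1
--                 else:
--                     tmp.append(word[3:])
--             elif len(word) > 1 and word[:2] in ["ye","ma"]:
--                 if len(word) == 2:
--                     answer += 1
--                 else:
--                     tmp.append(word[2:])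
--         babbling = tmp
--     return answer
-- ===== SOURCE B (Python) =====
-- def solution(babbling):
--     tokens = ("aya", "ye", "woo", "ma")
--
--     def ok(w):
--         # language membership for (aya|ye|woo|ma)+ on a nonempty suffix,
--         # by backtracking recursion on the suffix
--         if w == "":
--             return True
--         return any(w.startswith(t) and ok(w[len(t):]) for t in tokens)
--
--     return sum(1 for w in babbling if w != "" and ok(w))
-- ===== Notes on version B (the rewrite author's own statement) =====
-- stated objective: simpler
-- what changed: Replaces A's multi-round queue that strips one token per word per round and requeues remainders with a direct per-word recursive recognizer for the language (aya|ye|woo|ma)+, summed over the list in one pass.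
import Mathlib
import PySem

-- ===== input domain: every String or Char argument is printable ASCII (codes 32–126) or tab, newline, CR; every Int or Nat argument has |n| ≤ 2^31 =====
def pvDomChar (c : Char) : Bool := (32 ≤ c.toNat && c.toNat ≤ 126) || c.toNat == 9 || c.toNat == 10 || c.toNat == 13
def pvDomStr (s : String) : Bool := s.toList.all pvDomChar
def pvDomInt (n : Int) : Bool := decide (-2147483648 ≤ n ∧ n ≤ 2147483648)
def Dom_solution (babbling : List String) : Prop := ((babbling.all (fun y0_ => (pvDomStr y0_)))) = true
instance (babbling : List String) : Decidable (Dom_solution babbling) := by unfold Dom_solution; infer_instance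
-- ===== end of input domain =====

-- B replaces A's multi-round strip-and-requeue queue with a direct per-word
-- recursive recognizer for the token language (aya|ye|woo|ma)+, summed in one pass.


-- ===== PORT A =====
-- one pass of A's 'for word in babbling' body: accumulates answer and tmp
-- (word[:3] / word[3:] with nonnegative literal bounds are List.take 3 / List.drop 3 exactly)
def roundA : List (List Char) → Int → List (List Char) → Int × List (List Char)
  | [], answer, tmp => (answer, tmp)
  | w :: rest, answer, tmp =>
    if w.length > 2 ∧ (w.take 3 = "aya".toList ∨ w.take 3 = "woo".toList) then
      if w.length = 3 then roundA rest (answer + 1) tmp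
      else roundA rest answer (tmp ++ [w.drop 3])
    else if w.length > 1 ∧ (w.take 2 = "ye".toList ∨ w.take 2 = "ma".toList) then
      if w.length = 2 then roundA rest (answer + 1) tmp
      else roundA rest answer (tmp ++ [w.drop 2])
    else roundA rest answer tmp

-- measure for A's while-loop: Σ (|w| + 1)
def muA (ws : List (List Char)) : Nat := (ws.map (fun w => w.length + 1)).sum

theorem muA_cons (w : List Char) (ws : List (List Char)) :
    muA (w :: ws) = w.length + 1 + muA ws := by
  simp [muA]

theorem muA_snoc (ws : List (List Char)) (w : List Char) :
    muA (ws ++ [w]) = muA ws + w.length + 1 := by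
  simp [muA]; omega

theorem roundA_mu (ws : List (List Char)) (a : Int) (tmp : List (List Char)) :
    muA (roundA ws a tmp).2 + ws.length ≤ muA tmp + muA ws := by
  induction ws generalizing a tmp with
  | nil => simp [roundA]
  | cons w rest ih =>
    simp only [roundA, List.length_cons, muA_cons]
    split_ifs with h1 h2 h3 h4
    · have := ih (a + 1) tmp; omega
    · have := ih a (tmp ++ [w.drop 3])
      rw [muA_snoc] at this
      have hd : (w.drop 3).length = w.length - 3 := by simp
      omega
    · have := ih (a + 1) tmp; omega
    · have := ih a (tmp ++ [w.drop 2])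
      rw [muA_snoc] at this
      have hd : (w.drop 2).length = w.length - 2 := by simp
      omega
    · have := ih a tmp; omega

-- A's 'while babbling:' loop
def loopA (ws : List (List Char)) (answer : Int) : Int :=
  if h : ws = [] then answer
  else loopA (roundA ws answer []).2 (roundA ws answer []).1
  termination_by muA ws
  decreasing_by
    have hmu := roundA_mu ws answer []
    have hlen : 0 < ws.length := List.length_pos_iff.mpr h
    have h0 : muA ([] : List (List Char)) = 0 := rfl
    omega

def solution (babbling : List String) : Int :=
  loopA (babbling.map String.toList) 0

-- ===== PORT B =====
-- Source B's ok: backtracking membership in (aya|ye|woo|ma)+ on the char list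
def okB (w : List Char) : Bool :=
  if w = [] then true
  else
    (PySem.Chars.startswith w "aya".toList && okB (w.drop 3)) ||
    (PySem.Chars.startswith w "ye".toList && okB (w.drop 2)) ||
    (PySem.Chars.startswith w "woo".toList && okB (w.drop 3)) ||
    (PySem.Chars.startswith w "ma".toList && okB (w.drop 2))
  termination_by w.length
  decreasing_by
    all_goals
      rename_i h
      have : 0 < w.length := List.length_pos_iff.mpr h
      simp [List.length_drop]; omega

-- Source B's sum(1 for w in babbling if w != "" and ok(w))
def solution_alt (babbling : List String) : Int :=
  babbling.foldl
    (fun acc s => if s.toList ≠ [] ∧ okB s.toList then acc + 1 else acc) 0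

-- ===== PRECONDITION & SPEC =====
def Spec_solution (babbling : List String) (out : Int) : Prop := out = solution_alt babbling
instance (babbling : List String) (out : Int) : Decidable (Spec_solution babbling out) := by unfold Spec_solution; infer_instance

-- ===== CLAIM (what is proved, stated in full; the proofs are below) =====
def Claim_equal_solution : Prop := ∀ (babbling : List String), Dom_solution babbling → Spec_solution babbling (solution babbling)

-- ===== LEMMAS AND PROOFS =====

-- the number of acceptable words in a list (the quantity B computes)
def cntB (ws : List (List Char)) : Int :=
  (ws.countP (fun w => !w.isEmpty && okB w) : Int)

theorem cntB_nil : cntB [] = 0 := by simp [cntB]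

theorem cntB_cons (w : List Char) (ws : List (List Char)) :
    cntB (w :: ws) = (if (w ≠ [] ∧ okB w) then 1 else 0) + cntB ws := by
  unfold cntB
  rw [List.countP_cons]
  by_cases h1 : w = []
  · subst h1; simp
  · by_cases h2 : okB w
    · simp [h1, h2]; omega
    · simp [h1, h2]

theorem cntB_append (xs ys : List (List Char)) :
    cntB (xs ++ ys) = cntB xs + cntB ys := by
  simp [cntB, List.countP_append]

-- okB steps exactly as A's unique-token strip does (tokens have distinct first chars)
theorem okB_strip3 (w : List Char) (hlen : w.length > 2)
    (h : w.take 3 = "aya".toList ∨ w.take 3 = "woo".toList) :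
    okB w = okB (w.drop 3) := by
  match w, hlen with
  | c0 :: c1 :: c2 :: r, _ =>
    have ht : (c0 :: c1 :: c2 :: r).take 3 = [c0, c1, c2] := rfl
    rw [ht] at h
    rw [okB]
    rcases h with h | h
    · simp only [show "aya".toList = ['a','y','a'] from rfl, List.cons.injEq] at h
      obtain ⟨h0, h1, h2, -⟩ := h
      subst h0; subst h1; subst h2
      simp [PySem.Chars.startswith, List.isPrefixOf]
    · simp only [show "woo".toList = ['w','o','o'] from rfl, List.cons.injEq] at h
      obtain ⟨h0, h1, h2, -⟩ := h
      subst h0; subst h1; subst h2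
      simp [PySem.Chars.startswith, List.isPrefixOf]

theorem okB_strip2 (w : List Char) (hlen : w.length > 1)
    (h : w.take 2 = "ye".toList ∨ w.take 2 = "ma".toList) :
    okB w = okB (w.drop 2) := by
  match w, hlen with
  | c0 :: c1 :: r, _ =>
    have ht : (c0 :: c1 :: r).take 2 = [c0, c1] := rfl
    rw [ht] at h
    rw [okB]
    rcases h with h | h
    · simp only [show "ye".toList = ['y','e'] from rfl, List.cons.injEq] at h
      obtain ⟨h0, h1, -⟩ := h
      subst h0; subst h1
      simp [PySem.Chars.startswith, List.isPrefixOf]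
    · simp only [show "ma".toList = ['m','a'] from rfl, List.cons.injEq] at h
      obtain ⟨h0, h1, -⟩ := h
      subst h0; subst h1
      simp [PySem.Chars.startswith, List.isPrefixOf]

theorem okB_none (w : List Char) (hw : w ≠ [])
    (h3 : ¬ (w.length > 2 ∧ (w.take 3 = "aya".toList ∨ w.take 3 = "woo".toList)))
    (h2 : ¬ (w.length > 1 ∧ (w.take 2 = "ye".toList ∨ w.take 2 = "ma".toList))) :
    okB w = false := by
  rw [okB, if_neg hw]
  have haya : PySem.Chars.startswith w "aya".toList = false := by
    rw [Bool.eq_false_iff]; intro hc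
    rw [PySem.Chars.startswith_iff] at hc
    refine h3 ⟨by have := hc.length_le; simp at this; omega, Or.inl ?_⟩
    rw [List.prefix_iff_eq_take] at hc
    simpa using hc.symm
  have hwoo : PySem.Chars.startswith w "woo".toList = false := by
    rw [Bool.eq_false_iff]; intro hc
    rw [PySem.Chars.startswith_iff] at hc
    refine h3 ⟨by have := hc.length_le; simp at this; omega, Or.inr ?_⟩
    rw [List.prefix_iff_eq_take] at hc
    simpa using hc.symm
  have hye : PySem.Chars.startswith w "ye".toList = false := by
    rw [Bool.eq_false_iff]; intro hc
    rw [PySem.Chars.startswith_iff] at hc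
    refine h2 ⟨by have := hc.length_le; simp at this; omega, Or.inl ?_⟩
    rw [List.prefix_iff_eq_take] at hc
    simpa using hc.symm
  have hma : PySem.Chars.startswith w "ma".toList = false := by
    rw [Bool.eq_false_iff]; intro hc
    rw [PySem.Chars.startswith_iff] at hc
    refine h2 ⟨by have := hc.length_le; simp at this; omega, Or.inr ?_⟩
    rw [List.prefix_iff_eq_take] at hc
    simpa using hc.symm
  simp only [show "aya".toList = ['a','y','a'] from rfl,
    show "woo".toList = ['w','o','o'] from rfl,
    show "ye".toList = ['y','e'] from rfl,
    show "ma".toList = ['m','a'] from rfl] at haya hwoo hye hma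
  simp [haya, hwoo, hye, hma]

theorem okB_nil : okB [] = true := by rw [okB]; simp

theorem cntB_singleton (w : List Char) :
    cntB [w] = if (w ≠ [] ∧ okB w) then 1 else 0 := by
  rw [cntB_cons, cntB_nil, add_zero]

theorem roundA_spec (ws : List (List Char)) (a : Int) (tmp : List (List Char)) :
    (roundA ws a tmp).1 + cntB (roundA ws a tmp).2 = a + cntB tmp + cntB ws := by
  induction ws generalizing a tmp with
  | nil => simp [roundA, cntB_nil]
  | cons w rest ih =>
    simp only [roundA]
    split_ifs with h1 h2 h3 h4
    · -- exact "aya"/"woo": count it; okB w = okB [] = true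
      have hw : w ≠ [] := by intro hc; subst hc; simp at h1
      have hdrop : w.drop 3 = [] := List.drop_eq_nil_iff.mpr (by omega)
      have hok : okB w = true := by
        rw [okB_strip3 w h1.1 h1.2, hdrop, okB_nil]
      rw [ih, cntB_cons, if_pos ⟨hw, hok⟩]; ring
    · -- strip "aya"/"woo": requeue a word with the same acceptance status
      have hw : w ≠ [] := by intro hc; subst hc; simp at h1
      have hlen3 : 3 < w.length := by omega
      have hdw : w.drop 3 ≠ [] := by
        intro hc; have := List.drop_eq_nil_iff.mp hc; omega
      have hok : okB w = okB (w.drop 3) := okB_strip3 w h1.1 h1.2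
      rw [ih, cntB_append, cntB_singleton, cntB_cons]
      by_cases hb : okB (w.drop 3) = true
      · rw [if_pos ⟨hdw, hb⟩, if_pos ⟨hw, hok.trans hb⟩]; ring
      · rw [if_neg (by simp [hb]), if_neg (by simp [hok, hb])]; ring
    · -- exact "ye"/"ma"
      have hw : w ≠ [] := by intro hc; subst hc; simp at h3
      have hdrop : w.drop 2 = [] := List.drop_eq_nil_iff.mpr (by omega)
      have hok : okB w = true := by
        rw [okB_strip2 w h3.1 h3.2, hdrop, okB_nil]
      rw [ih, cntB_cons, if_pos ⟨hw, hok⟩]; ring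
    · -- strip "ye"/"ma"
      have hw : w ≠ [] := by intro hc; subst hc; simp at h3
      have hdw : w.drop 2 ≠ [] := by
        intro hc; have := List.drop_eq_nil_iff.mp hc; omega
      have hok : okB w = okB (w.drop 2) := okB_strip2 w h3.1 h3.2
      rw [ih, cntB_append, cntB_singleton, cntB_cons]
      by_cases hb : okB (w.drop 2) = true
      · rw [if_pos ⟨hdw, hb⟩, if_pos ⟨hw, hok.trans hb⟩]; ring
      · rw [if_neg (by simp [hb]), if_neg (by simp [hok, hb])]; ring
    · -- no token matches: A drops the word, okB is false
      by_cases hw : w = []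
      · subst hw
        rw [ih, cntB_cons, if_neg (by simp)]; ring
      · have hok : okB w = false := okB_none w hw h1 h3
        rw [ih, cntB_cons, if_neg (by simp [hok])]; ring

theorem loopA_spec (ws : List (List Char)) (a : Int) :
    loopA ws a = a + cntB ws := by
  induction ws, a using loopA.induct with
  | case1 a => rw [loopA]; simp [cntB_nil]
  | case2 ws a h ih =>
    rw [loopA, dif_neg h, ih]
    have := roundA_spec ws a []
    rw [cntB_nil] at this
    omega

theorem alt_foldl (l : List String) (acc : Int) :
    l.foldl (fun acc s => if s.toList ≠ [] ∧ okB s.toList then acc + 1 else acc) acc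
      = acc + cntB (l.map String.toList) := by
  induction l generalizing acc with
  | nil => simp [cntB_nil]
  | cons s rest ih =>
    simp only [List.foldl_cons, List.map_cons]
    rw [ih, cntB_cons]
    split_ifs <;> ring

-- ===== VERDICT (by name: the statement is the Claim_ definition above) =====
theorem solution_spec : Claim_equal_solution := by
  intro babbling _
  unfold Spec_solution solution solution_alt
  rw [loopA_spec, alt_foldl]
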